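-- pv_equiv track=rewrite | github.com/Taoooo9/Cail_Text_similarity_esimtribert | Units/units.py | find_maxlennum
-- ===== SOURCE A (Python) =====
-- def find_maxlennum(batch):
--     max_len = 0
--     sen_p_num = 0
--     sen_h_num = 0
--     for line in batch:
--         if line[3] > max_len:
--             max_len = line[3]
--         for idx, sen in enumerate(line[0:3]):
--             if idx == 0:
--                 if len(sen) > sen_p_num:
--                     sen_p_num = len(sen)
--             else:
--                 if len(sen) > sen_h_num:
--                     sen_h_num = len(sen)
--     return max_len, sen_p_num, sen_h_num
-- ===== SOURCE B (Python) =====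
-- def find_maxlennum(batch):
--     # Divide-and-conquer: summarise each line to a triple, combine halves with
--     # the componentwise-max monoid (identity (0,0,0)).
--     def rec(lo, hi):
--         if lo == hi:
--             return (0, 0, 0)
--         if hi - lo == 1:
--             line = batch[lo]
--             return (max(0, line[3]), max(0, len(line[0])),
--                     max(0, len(line[1]), len(line[2])))
--         mid = (lo + hi) // 2
--         l = rec(lo, mid)
--         r = rec(mid, hi)
--         return (max(l[0], r[0]), max(l[1], r[1]), max(l[2], r[2]))
--     return rec(0, len(batch))
-- ===== Notes on version B (the rewrite author's own statement) =====
-- stated objective: alternative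
-- what changed: Replaces A's single linear pass with interleaved running-max accumulators by a divide-and-conquer tree reduction: each line is summarised to a triple and halves are combined with the componentwise-max monoid (identity (0,0,0)).
import Mathlib
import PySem

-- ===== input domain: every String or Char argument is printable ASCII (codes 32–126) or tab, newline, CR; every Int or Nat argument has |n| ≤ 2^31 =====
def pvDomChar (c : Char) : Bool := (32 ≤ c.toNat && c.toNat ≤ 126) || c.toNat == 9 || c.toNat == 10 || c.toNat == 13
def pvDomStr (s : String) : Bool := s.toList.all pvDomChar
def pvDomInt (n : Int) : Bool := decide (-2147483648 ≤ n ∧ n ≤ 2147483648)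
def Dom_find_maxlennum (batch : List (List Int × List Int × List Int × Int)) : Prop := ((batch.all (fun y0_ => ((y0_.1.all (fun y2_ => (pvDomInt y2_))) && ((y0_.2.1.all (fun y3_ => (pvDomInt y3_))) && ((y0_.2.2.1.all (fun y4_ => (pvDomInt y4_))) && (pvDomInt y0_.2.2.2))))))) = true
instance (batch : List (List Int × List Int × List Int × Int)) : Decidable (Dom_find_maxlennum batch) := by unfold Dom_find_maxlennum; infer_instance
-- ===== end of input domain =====

-- ===== PORT A =====
-- B replaces A's single linear pass with interleaved running-max accumulators by a
-- divide-and-conquer tree reduction under the componentwise-max monoid (objective: alternative).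
-- Port of A: one fold carrying (max_len, sen_p_num, sen_h_num); the inner
-- 'for idx, sen in enumerate(line[0:3])' runs over a fixed 3-element slice and
-- is transliterated as its three iterations (idx = 0, 1, 2) in order.
def find_maxlennum (batch : List (List Int × List Int × List Int × Int)) : Int × Int × Int :=
  batch.foldl (fun st line =>
    let max_len := if line.2.2.2 > st.1 then line.2.2.2 else st.1
    let sen_p_num := if (line.1.length : Int) > st.2.1 then (line.1.length : Int) else st.2.1
    let sen_h_num := if (line.2.1.length : Int) > st.2.2 then (line.2.1.length : Int) else st.2.2
    let sen_h_num := if (line.2.2.1.length : Int) > sen_h_num then (line.2.2.1.length : Int) else sen_h_num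
    (max_len, sen_p_num, sen_h_num)) (0, 0, 0)

-- ===== PORT B =====
-- Port of B's recursive helper rec(lo, hi): the index segment batch[lo:hi] becomes the
-- list segment itself (empty / singleton / split at mid = length/2 and combine with
-- componentwise max). The Nat fuel (called with the segment's length) only makes the
-- recursion structural for Lean; the 0-fuel non-empty branch is never reached.
def pvRec_find_maxlennum : Nat → List (List Int × List Int × List Int × Int) → Int × Int × Int
  | _, [] => (0, 0, 0)
  | _, [line] => (max 0 line.2.2.2, max 0 (line.1.length : Int),
                  max 0 (max (line.2.1.length : Int) (line.2.2.1.length : Int)))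
  | Nat.succ fuel, x :: y :: rest =>
    let seg := x :: y :: rest
    let mid := seg.length / 2
    let l := pvRec_find_maxlennum fuel (seg.take mid)
    let r := pvRec_find_maxlennum fuel (seg.drop mid)
    (max l.1 r.1, max l.2.1 r.2.1, max l.2.2 r.2.2)
  | 0, _ :: _ :: _ => (0, 0, 0)

def find_maxlennum_alt (batch : List (List Int × List Int × List Int × Int)) : Int × Int × Int :=
  pvRec_find_maxlennum batch.length batch

-- ===== PRECONDITION & SPEC =====
def Spec_find_maxlennum (batch : List (List Int × List Int × List Int × Int)) (out : Int × Int × Int) : Prop := out = find_maxlennum_alt batch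
instance (batch : List (List Int × List Int × List Int × Int)) (out : Int × Int × Int) : Decidable (Spec_find_maxlennum batch out) := by unfold Spec_find_maxlennum; infer_instance

-- ===== CLAIM (what is proved, stated in full; the proofs are below) =====
def Claim_equal_find_maxlennum : Prop := ∀ (batch : List (List Int × List Int × List Int × Int)), Dom_find_maxlennum batch → Spec_find_maxlennum batch (find_maxlennum batch)

-- ===== LEMMAS AND PROOFS =====

-- both programs equal this componentwise 0-seeded running maximum
def pvSpecMax (batch : List (List Int × List Int × List Int × Int)) : Int × Int × Int :=
  ((batch.map (fun line => line.2.2.2)).foldl max 0,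
   (batch.map (fun line => (line.1.length : Int))).foldl max 0,
   (batch.map (fun line => max (line.2.1.length : Int) (line.2.2.1.length : Int))).foldl max 0)

lemma foldl_max_shift (l : List Int) : ∀ a b : Int, l.foldl max (max a b) = max a (l.foldl max b) := by
  induction l with
  | nil => intro a b; rfl
  | cons c tl ih =>
    intro a b
    simp only [List.foldl_cons, max_assoc]
    exact ih a (max b c)

lemma foldl_max_zero_append (x y : List Int) :
    (x ++ y).foldl max 0 = max (x.foldl max 0) (y.foldl max 0) := by
  rw [List.foldl_append]
  have h0 : (0 : Int) ≤ x.foldl max 0 := (PySem.List.le_foldl_max x 0).1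
  calc y.foldl max (x.foldl max 0) = y.foldl max (max (x.foldl max 0) 0) := by
        rw [max_eq_left h0]
    _ = max (x.foldl max 0) (y.foldl max 0) := foldl_max_shift y _ 0

lemma pvSpecMax_append (x y : List (List Int × List Int × List Int × Int)) :
    pvSpecMax (x ++ y) = (max (pvSpecMax x).1 (pvSpecMax y).1,
                          max (pvSpecMax x).2.1 (pvSpecMax y).2.1,
                          max (pvSpecMax x).2.2 (pvSpecMax y).2.2) := by
  simp only [pvSpecMax, List.map_append, foldl_max_zero_append]

lemma pvRec_eq_spec : ∀ (fuel : Nat) (l : List (List Int × List Int × List Int × Int)),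
    l.length ≤ fuel → pvRec_find_maxlennum fuel l = pvSpecMax l := by
  intro fuel
  induction fuel with
  | zero =>
    intro l hl
    match l, hl with
    | [], _ => simp [pvRec_find_maxlennum, pvSpecMax]
  | succ fuel ih =>
    intro l hl
    match l with
    | [] => simp [pvRec_find_maxlennum, pvSpecMax]
    | [line] => simp [pvRec_find_maxlennum, pvSpecMax, max_comm]
    | x :: y :: rest =>
      rw [pvRec_find_maxlennum]
      have h1 : ((x :: y :: rest).take ((x :: y :: rest).length / 2)).length ≤ fuel := by
        simp only [List.length_take]; simp at hl ⊢; omega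
      have h2 : ((x :: y :: rest).drop ((x :: y :: rest).length / 2)).length ≤ fuel := by
        simp only [List.length_drop]; simp at hl ⊢; omega
      simp only [ih _ h1, ih _ h2]
      conv_rhs => rw [← List.take_append_drop ((x :: y :: rest).length / 2) (x :: y :: rest),
        pvSpecMax_append]

lemma find_maxlennum_fold (batch : List (List Int × List Int × List Int × Int)) :
    ∀ a b c : Int,
    batch.foldl (fun st line =>
      let max_len := if line.2.2.2 > st.1 then line.2.2.2 else st.1
      let sen_p_num := if (line.1.length : Int) > st.2.1 then (line.1.length : Int) else st.2.1
      let sen_h_num := if (line.2.1.length : Int) > st.2.2 then (line.2.1.length : Int) else st.2.2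
      let sen_h_num := if (line.2.2.1.length : Int) > sen_h_num then (line.2.2.1.length : Int) else sen_h_num
      (max_len, sen_p_num, sen_h_num)) (a, b, c)
    = ((batch.map (fun line => line.2.2.2)).foldl max a,
       (batch.map (fun line => (line.1.length : Int))).foldl max b,
       (batch.map (fun line => max (line.2.1.length : Int) (line.2.2.1.length : Int))).foldl max c) := by
  induction batch with
  | nil => intro a b c; simp
  | cons hd tl ih =>
    intro a b c
    simp only [List.foldl_cons, List.map_cons]
    rw [ih]
    have h1 : (if hd.2.2.2 > a then hd.2.2.2 else a) = max a hd.2.2.2 := by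
      simp [Int.max_def]; split_ifs <;> omega
    have h2 : (if (hd.1.length : Int) > b then (hd.1.length : Int) else b) = max b (hd.1.length : Int) := by
      simp [Int.max_def]; split_ifs <;> omega
    have h3 : (if (hd.2.2.1.length : Int) >
          (if (hd.2.1.length : Int) > c then (hd.2.1.length : Int) else c)
          then (hd.2.2.1.length : Int)
          else (if (hd.2.1.length : Int) > c then (hd.2.1.length : Int) else c))
          = max c (max (hd.2.1.length : Int) (hd.2.2.1.length : Int)) := by
      simp [Int.max_def]; split_ifs <;> omega
    rw [h1, h2, h3]

-- ===== VERDICT (by name: the statement is the Claim_ definition above) =====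
theorem find_maxlennum_spec : Claim_equal_find_maxlennum := by
  intro batch _
  unfold Spec_find_maxlennum find_maxlennum find_maxlennum_alt
  rw [pvRec_eq_spec batch.length batch (le_refl _)]
  exact (find_maxlennum_fold batch 0 0 0)
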